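-- pv_equiv track=rewrite | github.com/benitaneo/007Analytics | lambda_functions/admin_functions.py | separatelogs
-- ===== SOURCE A (Python) =====
-- def separatelogs(logs):
--   lastdate = [1518969097289,
--               1519570638599,
--               1520179166641,
--               1520783949758,
--               1521388793831,
--               1521993504702,
--               1522598131232]
--   separated = [{},{},{},{},{},{},{}]
--   for log in logs:
--     if logs[log]['createdAt'] <= lastdate[0]:
--       separated[0][log] = logs[log]
--     elif logs[log]['createdAt'] <= lastdate[1]:
--       separated[1][log] = logs[log]
--     elif logs[log]['createdAt'] <= lastdate[2]:
--       separated[2][log] = logs[log]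
--     elif logs[log]['createdAt'] <= lastdate[3]:
--       separated[3][log] = logs[log]
--     elif logs[log]['createdAt'] <= lastdate[4]:
--       separated[4][log] = logs[log]
--     elif logs[log]['createdAt'] <= lastdate[5]:
--       separated[5][log] = logs[log]
--     elif logs[log]['createdAt'] <= lastdate[6]:
--       separated[6][log] = logs[log]
--     elif logs[log]['createdAt'] <= lastdate[7]:
--       separated[7][log] = logs[log]
--   return separated
-- ===== SOURCE B (Python) =====
-- def separatelogs(logs):
--   lastdate = [1518969097289,
--               1519570638599,
--               1520179166641,
--               1520783949758,
--               1521388793831,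
--               1521993504702,
--               1522598131232]
--   separated = [{},{},{},{},{},{},{}]
--   for log in logs:
--     t = logs[log]['createdAt']
--     # binary search for the first threshold >= t (bisect_left semantics)
--     lo, hi = 0, 7
--     while lo < hi:
--       mid = (lo + hi) // 2
--       if lastdate[mid] < t:
--         lo = mid + 1
--       else:
--         hi = mid
--     separated[lo][log] = logs[log]
--   return separated
-- ===== Notes on version B (the rewrite author's own statement) =====
-- stated objective: alternative
-- what changed: The unrolled 8-way if/elif comparison chain is replaced by a hand-written binary search (bisect_left semantics) over the sorted 7-element threshold list, computing the bucket index in one loop and doing a single indexed assignment.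
import Mathlib
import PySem

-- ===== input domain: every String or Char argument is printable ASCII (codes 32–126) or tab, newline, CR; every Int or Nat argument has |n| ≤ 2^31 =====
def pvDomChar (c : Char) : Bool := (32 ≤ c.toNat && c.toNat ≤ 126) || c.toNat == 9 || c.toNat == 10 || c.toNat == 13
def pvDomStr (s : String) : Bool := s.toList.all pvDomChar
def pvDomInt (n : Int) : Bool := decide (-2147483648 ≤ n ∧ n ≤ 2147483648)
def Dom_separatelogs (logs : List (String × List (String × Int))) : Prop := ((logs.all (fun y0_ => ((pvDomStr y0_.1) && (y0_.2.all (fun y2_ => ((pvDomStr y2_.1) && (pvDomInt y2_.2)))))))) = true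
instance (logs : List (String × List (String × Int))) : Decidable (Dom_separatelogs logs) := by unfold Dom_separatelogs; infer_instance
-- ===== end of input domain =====

-- B replaces A's unrolled 8-way if/elif comparison chain by a hand-written binary search
-- (bisect_left semantics) over the sorted 7-element threshold list (objective: alternative).

-- ===== PORT A =====
-- `separated[i][log] = logs[log]` : dict assignment in the i-th bucket (buckets are PySem.Dict during
-- the loop; `return separated` yields their association lists).  Shared by both ports.
def pvUpd (sep : List (PySem.Dict String (List (String × Int)))) (i : Nat)
    (k : String) (v : List (String × Int)) : List (PySem.Dict String (List (String × Int))) :=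
  sep.set i ((sep.getD i PySem.Dict.empty).insert k v)

-- `logs[log]['createdAt']` (re-evaluated in every branch, as A's Python does): first-match lookup
-- in the entry's association list; a missing key is a KeyError, excluded by Pre_ (getD 0 is then
-- never the value Python sees, since Pre_ rules the input out).
def separatelogs (logs : List (String × List (String × Int))) : List (List (String × List (String × Int))) :=
  let lastdate : List Int := [1518969097289, 1519570638599, 1520179166641, 1520783949758,
                              1521388793831, 1521993504702, 1522598131232]
  ((logs.foldl (fun sep kv =>
      if (kv.2.lookup "createdAt").getD 0 ≤ lastdate.getD 0 0 then pvUpd sep 0 kv.1 kv.2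
      else if (kv.2.lookup "createdAt").getD 0 ≤ lastdate.getD 1 0 then pvUpd sep 1 kv.1 kv.2
      else if (kv.2.lookup "createdAt").getD 0 ≤ lastdate.getD 2 0 then pvUpd sep 2 kv.1 kv.2
      else if (kv.2.lookup "createdAt").getD 0 ≤ lastdate.getD 3 0 then pvUpd sep 3 kv.1 kv.2
      else if (kv.2.lookup "createdAt").getD 0 ≤ lastdate.getD 4 0 then pvUpd sep 4 kv.1 kv.2
      else if (kv.2.lookup "createdAt").getD 0 ≤ lastdate.getD 5 0 then pvUpd sep 5 kv.1 kv.2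
      else if (kv.2.lookup "createdAt").getD 0 ≤ lastdate.getD 6 0 then pvUpd sep 6 kv.1 kv.2
      else sep)  -- here Python's final elif evaluates lastdate[7]: IndexError, excluded by Pre_
    [.empty, .empty, .empty, .empty, .empty, .empty, .empty]).map PySem.Dict.items)

-- ===== PORT B =====
-- `while lo < hi: …` of Source B, ported with fuel (8 > any possible iteration count for hi - lo ≤ 7)
def pvBisectLoop (lastdate : List Int) (t : Int) : Nat → Nat → Nat → Nat
  | 0, lo, _ => lo
  | fuel + 1, lo, hi =>
    if lo < hi then
      let mid := (lo + hi) / 2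
      if lastdate.getD mid 0 < t then pvBisectLoop lastdate t fuel (mid + 1) hi
      else pvBisectLoop lastdate t fuel lo mid
    else lo

def separatelogs_alt (logs : List (String × List (String × Int))) : List (List (String × List (String × Int))) :=
  let lastdate : List Int := [1518969097289, 1519570638599, 1520179166641, 1520783949758,
                              1521388793831, 1521993504702, 1522598131232]
  ((logs.foldl (fun sep kv =>
      -- index 7 means `separated[7]`: IndexError in Python, excluded by Pre_ (List.set is then a no-op)
      pvUpd sep (pvBisectLoop lastdate ((kv.2.lookup "createdAt").getD 0) 8 0 7) kv.1 kv.2)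
    [.empty, .empty, .empty, .empty, .empty, .empty, .empty]).map PySem.Dict.items)

-- ===== PRECONDITION & SPEC =====
-- Pre_ excludes exactly the inputs on which A raises: a log entry without a 'createdAt' key (KeyError)
-- or with createdAt above the last threshold (A's final elif reads lastdate[7]: IndexError); the logs
-- argument is a Python dict, so its association-list representation has pairwise-distinct keys.
def Pre_separatelogs (logs : List (String × List (String × Int))) : Prop :=
  (logs.map Prod.fst).Nodup ∧
  ∀ p ∈ logs, "createdAt" ∈ p.2.map Prod.fst ∧ (p.2.lookup "createdAt").getD 0 ≤ 1522598131232
instance (logs : List (String × List (String × Int))) : Decidable (Pre_separatelogs logs) := by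
  unfold Pre_separatelogs; infer_instance

def pvWitness_separatelogs : (List (String × List (String × Int))) :=
  [("a", [("createdAt", 1000)]), ("b", [("createdAt", -5)])]

def Spec_separatelogs (logs : List (String × List (String × Int))) (out : List (List (String × List (String × Int)))) : Prop := out = separatelogs_alt logs
instance (logs : List (String × List (String × Int))) (out : List (List (String × List (String × Int)))) : Decidable (Spec_separatelogs logs out) := by unfold Spec_separatelogs; infer_instance

-- ===== CLAIM (what is proved, stated in full; the proofs are below) =====
def Claim_equal_separatelogs : Prop := ∀ (logs : List (String × List (String × Int))), Dom_separatelogs logs → Pre_separatelogs logs → Spec_separatelogs logs (separatelogs logs)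

-- ===== LEMMAS AND PROOFS =====

-- value of B's binary search over the fixed 7-threshold table
set_option maxHeartbeats 1000000 in
lemma pvBisect_val (t : Int) :
    pvBisectLoop [1518969097289, 1519570638599, 1520179166641, 1520783949758,
                  1521388793831, 1521993504702, 1522598131232] t 8 0 7 =
      if t ≤ 1518969097289 then 0
      else if t ≤ 1519570638599 then 1
      else if t ≤ 1520179166641 then 2
      else if t ≤ 1520783949758 then 3
      else if t ≤ 1521388793831 then 4
      else if t ≤ 1521993504702 then 5
      else if t ≤ 1522598131232 then 6
      else 7 := by
  simp only [pvBisectLoop, List.getD, List.getElem?_cons_succ, List.getElem?_cons_zero,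
    Option.getD_some, Nat.reduceDiv, Nat.reduceAdd, Nat.reduceLT, if_true, if_false]
  split_ifs <;> omega

-- the two loop bodies coincide on any 7-element accumulator
lemma pvStep_eq (sep : List (PySem.Dict String (List (String × Int))))
    (hlen : sep.length = 7) (t : Int) (k : String) (v : List (String × Int)) :
    (if t ≤ (1518969097289 : Int) then pvUpd sep 0 k v
     else if t ≤ 1519570638599 then pvUpd sep 1 k v
     else if t ≤ 1520179166641 then pvUpd sep 2 k v
     else if t ≤ 1520783949758 then pvUpd sep 3 k v
     else if t ≤ 1521388793831 then pvUpd sep 4 k v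
     else if t ≤ 1521993504702 then pvUpd sep 5 k v
     else if t ≤ 1522598131232 then pvUpd sep 6 k v
     else sep) =
    pvUpd sep (pvBisectLoop [1518969097289, 1519570638599, 1520179166641, 1520783949758,
                             1521388793831, 1521993504702, 1522598131232] t 8 0 7) k v := by
  rw [pvBisect_val]
  split_ifs <;> try rfl
  -- index 7: List.set past the end of the 7-element accumulator is the identity
  unfold pvUpd
  rw [List.set_eq_of_length_le (by omega)]

lemma pvUpd_length (sep : List (PySem.Dict String (List (String × Int)))) (i : Nat)
    (k : String) (v : List (String × Int)) : (pvUpd sep i k v).length = sep.length := by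
  simp [pvUpd]

-- the whole loops coincide on any 7-element start accumulator
lemma pvLoop_eq (logs : List (String × List (String × Int)))
    (sep : List (PySem.Dict String (List (String × Int)))) (hlen : sep.length = 7) :
    logs.foldl (fun sep kv =>
      if (kv.2.lookup "createdAt").getD 0 ≤ (1518969097289 : Int) then pvUpd sep 0 kv.1 kv.2
      else if (kv.2.lookup "createdAt").getD 0 ≤ 1519570638599 then pvUpd sep 1 kv.1 kv.2
      else if (kv.2.lookup "createdAt").getD 0 ≤ 1520179166641 then pvUpd sep 2 kv.1 kv.2
      else if (kv.2.lookup "createdAt").getD 0 ≤ 1520783949758 then pvUpd sep 3 kv.1 kv.2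
      else if (kv.2.lookup "createdAt").getD 0 ≤ 1521388793831 then pvUpd sep 4 kv.1 kv.2
      else if (kv.2.lookup "createdAt").getD 0 ≤ 1521993504702 then pvUpd sep 5 kv.1 kv.2
      else if (kv.2.lookup "createdAt").getD 0 ≤ 1522598131232 then pvUpd sep 6 kv.1 kv.2
      else sep) sep =
    logs.foldl (fun sep kv =>
      pvUpd sep (pvBisectLoop [1518969097289, 1519570638599, 1520179166641, 1520783949758,
                               1521388793831, 1521993504702, 1522598131232]
                  ((kv.2.lookup "createdAt").getD 0) 8 0 7) kv.1 kv.2) sep := by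
  induction logs generalizing sep with
  | nil => rfl
  | cons kv rest ih =>
    simp only [List.foldl_cons]
    rw [pvStep_eq sep hlen ((kv.2.lookup "createdAt").getD 0) kv.1 kv.2]
    apply ih
    rw [pvUpd_length, hlen]

-- ===== VERDICT (by name: the statement is the Claim_ definition above) =====
theorem separatelogs_spec : Claim_equal_separatelogs := by
  intro logs _ _
  unfold Spec_separatelogs separatelogs separatelogs_alt
  simp only [List.getD, List.getElem?_cons_succ, List.getElem?_cons_zero, Option.getD_some]
  exact congrArg (List.map PySem.Dict.items) (pvLoop_eq logs _ (by rfl))
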